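-- pv_equiv track=rewrite | github.com/Joshua992700/ESEC-Portal | sequence/gray_code.py | is_valid_gray_code
-- ===== SOURCE A (Python) =====
-- def is_valid_gray_code(sequence):
--     n = max(sequence).bit_length()  # Calculate n based on max value
--     max_value = (1 << n) - 1  # 2^n - 1
--
--     # Condition 1: All numbers should be in range [0, 2^n - 1]
--     if any(num < 0 or num > max_value for num in sequence):
--         return False
--
--     # Condition 2: No duplicates
--     if len(sequence) != len(set(sequence)):
--         return False
--
--     # Condition 3: Check if consecutive numbers differ by exactly one bit
--     def hamming_distance(x, y):
--         return bin(x ^ y).count('1')  # XOR and count 1s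
--
--     for i in range(len(sequence) - 1):
--         if hamming_distance(sequence[i], sequence[i + 1]) != 1:
--             return False
--
--     # Condition 4: Check circular difference
--     if hamming_distance(sequence[0], sequence[-1]) != 1:
--         return False
--
--     return True
-- ===== SOURCE B (Python) =====
-- def is_valid_gray_code(sequence):
--     # Nonnegativity is the whole range condition: max(sequence) itself always
--     # satisfies max <= 2**max.bit_length() - 1, so no bit_length is needed.
--     if min(sequence) < 0:
--         return False
--     # Duplicates: sort, then any equal adjacent pair.
--     s = sorted(sequence)
--     for a, b in zip(s, s[1:]):
--         if a == b:
--             return False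
--     # Adjacency (circular, via a rotated copy): each XOR must be a power of two,
--     # tested with the d & (d - 1) trick instead of a popcount.
--     rotated = sequence[1:] + sequence[:1]
--     for x, y in zip(sequence, rotated):
--         d = x ^ y
--         if d == 0 or d & (d - 1) != 0:
--             return False
--     return True
-- ===== Notes on version B (the rewrite author's own statement) =====
-- stated objective: alternative
-- what changed: B drops A's bit_length/max_value machinery entirely (the range condition provably reduces to min(sequence) >= 0, since every element is <= max <= 2**max.bit_length()-1), replaces the hash-set duplicate test by sort-then-adjacent-scan, and tests single-bit adjacency over zip(sequence, rotated copy) with the power-of-two trick d & (d-1) == 0 instead of popcounting bin(x^y).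
import Mathlib
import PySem

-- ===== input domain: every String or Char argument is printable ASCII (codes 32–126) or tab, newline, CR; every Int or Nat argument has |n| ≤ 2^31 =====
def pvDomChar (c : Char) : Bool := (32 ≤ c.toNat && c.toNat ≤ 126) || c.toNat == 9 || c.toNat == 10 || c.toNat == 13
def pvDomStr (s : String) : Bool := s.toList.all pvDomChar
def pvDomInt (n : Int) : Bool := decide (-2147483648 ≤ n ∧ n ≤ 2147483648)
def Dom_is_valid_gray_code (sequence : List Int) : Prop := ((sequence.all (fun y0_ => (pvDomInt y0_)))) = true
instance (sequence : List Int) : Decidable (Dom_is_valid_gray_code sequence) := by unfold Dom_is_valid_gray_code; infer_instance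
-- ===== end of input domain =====

-- B replaces A's bit_length range machinery by a plain min >= 0 test (provably equivalent),
-- its hash-set duplicate test by sort-then-adjacent-scan, and its popcount adjacency test by
-- the d & (d-1) power-of-two trick over zip with a rotated copy (objective: alternative).

-- ===== PORT A =====
-- bin(x ^ y).count('1'): PySem.Int.bxor is Python's ^, PySem.Int.bitCount is Python-exact
-- (counts the one bits of |z|, which is what bin(z).count('1') does).
def pyHamming (x y : Int) : Nat := PySem.Int.bitCount (PySem.Int.bxor x y)

def is_valid_gray_code (sequence : List Int) : Bool :=
  match PySem.List.max? sequence (fun x => x) with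
  | none => false  -- Python's max raises ValueError on an empty sequence; such inputs are excluded by Pre_
  | some m =>
    let n : Nat := PySem.Int.bitLength m
    let maxValue : Int := ((1 <<< n : Nat) : Int) - 1
    if sequence.any (fun num => decide (num < 0) || decide (maxValue < num)) then false
    else if sequence.length ≠ (PySem.Set.ofList sequence).length then false
    else if (List.range (sequence.length - 1)).any (fun i =>
        decide (pyHamming (PySem.List.pyGetD sequence (i : Int) 0)
                          (PySem.List.pyGetD sequence ((i : Int) + 1) 0) ≠ 1)) then false
    else if pyHamming (PySem.List.pyGetD sequence 0 0) (PySem.List.pyGetD sequence (-1) 0) ≠ 1 then false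
    else true

-- ===== PORT B =====
def is_valid_gray_code_alt (sequence : List Int) : Bool :=
  match PySem.List.min? sequence (fun x => x) with
  | none => false  -- Python's min raises ValueError on an empty sequence; such inputs are excluded by Pre_
  | some mn =>
    if decide (mn < 0) then false
    else
      -- s = sorted(sequence); for a, b in zip(s, s[1:]): if a == b: return False
      let s := PySem.List.sorted sequence (fun x => x) false
      if (s.zip (PySem.List.slice s (some 1) none)).any (fun p => p.1 == p.2) then false
      else
        -- rotated = sequence[1:] + sequence[:1]; power-of-two test d & (d - 1)
        let rotated := PySem.List.slice sequence (some 1) none ++ PySem.List.slice sequence none (some 1)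
        if (sequence.zip rotated).any (fun p =>
            let d := PySem.Int.bxor p.1 p.2
            decide (d = 0) || decide (PySem.Int.band d (d - 1) ≠ 0)) then false
        else true

-- ===== PRECONDITION & SPEC =====
-- Pre_: on the empty list both A and B raise ValueError (max/min of an empty sequence); everything else is admitted.
def Pre_is_valid_gray_code (sequence : List Int) : Prop := sequence ≠ []
instance (sequence : List Int) : Decidable (Pre_is_valid_gray_code sequence) := by unfold Pre_is_valid_gray_code; infer_instance
def pvWitness_is_valid_gray_code : List Int := [0, 1]

def Spec_is_valid_gray_code (sequence : List Int) (out : Bool) : Prop := out = is_valid_gray_code_alt sequence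
instance (sequence : List Int) (out : Bool) : Decidable (Spec_is_valid_gray_code sequence out) := by unfold Spec_is_valid_gray_code; infer_instance

-- ===== CLAIM (what is proved, stated in full; the proofs are below) =====
def Claim_equal_is_valid_gray_code : Prop := ∀ (sequence : List Int), Dom_is_valid_gray_code sequence → Pre_is_valid_gray_code sequence → Spec_is_valid_gray_code sequence (is_valid_gray_code sequence)

-- ===== LEMMAS AND PROOFS =====

lemma pyHamming_comm (x y : Int) : pyHamming x y = pyHamming y x := by
  unfold pyHamming; rw [PySem.Int.bxor_comm]

lemma pyGetD_neg_one (l : List Int) (h : l ≠ []) :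
    PySem.List.pyGetD l (-1) 0 = l.getD (l.length - 1) 0 := by
  have h0 : 0 < l.length := List.length_pos_iff.2 h
  simp only [PySem.List.pyGetD, PySem.List.pyGet?, PySem.List.pyIdx?]
  rw [if_neg (by omega), if_pos (by omega : -(l.length : Int) ≤ -1)]
  have h1 : (-(-1 : Int)).toNat = 1 := by decide
  rw [h1, Option.bind_some, List.getElem?_eq_getElem (by omega), Option.getD_some,
      List.getD_eq_getElem _ _ (by omega)]

-- condition 1 of A as a pointwise statement
lemma cond1_iff (l : List Int) (mv : Int) :
    (l.any (fun num => decide (num < 0) || decide (mv < num)) = false) ↔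
      ∀ j < l.length, 0 ≤ l.getD j 0 ∧ l.getD j 0 ≤ mv := by
  rw [List.any_eq_false]
  constructor
  · intro h j hj
    have := h (l.getD j 0) (by rw [List.getD_eq_getElem _ _ hj]; exact l.getElem_mem hj)
    simp only [Bool.or_eq_true, decide_eq_true_eq, not_or] at this
    omega
  · intro h x hx
    obtain ⟨j, hj, rfl⟩ := List.getElem_of_mem hx
    have := h j hj
    rw [List.getD_eq_getElem _ _ hj] at this
    simp only [Bool.or_eq_true, decide_eq_true_eq, not_or]
    omega

-- condition 2 of A: len(sequence) == len(set(sequence)) is exactly Nodup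
lemma cond2_iff (l : List Int) : l.length = (PySem.Set.ofList l).length ↔ l.Nodup := by
  constructor
  · intro h
    have hperm : (PySem.Set.ofList l).Perm l.dedup :=
      (List.perm_ext_iff_of_nodup (PySem.Set.nodup_ofList l) l.nodup_dedup).2
        (by intro a; rw [PySem.Set.mem_ofList, List.mem_dedup])
    have hlen : l.dedup.length = l.length := by rw [← hperm.length_eq, ← h]
    exact List.dedup_eq_self.1 ((l.dedup_sublist).eq_of_length hlen)
  · intro h
    rw [PySem.Set.ofList_eq_self_of_nodup _ h]

-- conditions 3+4 of A as the single circular pointwise statement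
lemma cond34_iff (l : List Int) (h : l ≠ []) :
    ((∀ i < l.length - 1, pyHamming (l.getD i 0) (l.getD (i + 1) 0) = 1) ∧
      pyHamming (l.getD 0 0) (l.getD (l.length - 1) 0) = 1) ↔
      ∀ j < l.length, pyHamming (l.getD j 0) (l.getD ((j + 1) % l.length) 0) = 1 := by
  have h0 : 0 < l.length := List.length_pos_iff.2 h
  constructor
  · rintro ⟨h3, h4⟩ j hj
    by_cases hj1 : j + 1 < l.length
    · rw [Nat.mod_eq_of_lt hj1]; exact h3 j (by omega)
    · have hje : j = l.length - 1 := by omega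
      subst hje
      rw [Nat.sub_add_cancel (by omega), Nat.mod_self]
      rw [pyHamming_comm]; exact h4
  · intro hall
    refine ⟨fun i hi => ?_, ?_⟩
    · have := hall i (by omega)
      rwa [Nat.mod_eq_of_lt (by omega)] at this
    · have := hall (l.length - 1) (by omega)
      rw [Nat.sub_add_cancel (by omega), Nat.mod_self] at this
      rw [pyHamming_comm]; exact this

-- condition 3 of A as a pointwise statement
lemma cond3_iff (l : List Int) :
    ((List.range (l.length - 1)).any (fun i =>
        decide (pyHamming (PySem.List.pyGetD l (i : Int) 0)
                          (PySem.List.pyGetD l ((i : Int) + 1) 0) ≠ 1)) = false) ↔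
      ∀ i < l.length - 1, pyHamming (l.getD i 0) (l.getD (i + 1) 0) = 1 := by
  rw [List.any_eq_false]
  have hc : ∀ i : Nat, ((i : Int) + 1) = ((i + 1 : Nat) : Int) := by intro i; push_cast; ring
  constructor
  · intro h i hi
    have := h i (List.mem_range.2 hi)
    simpa only [PySem.List.pyGetD_natCast, hc, decide_eq_true_eq, not_not] using this
  · intro h i hi
    rw [List.mem_range] at hi
    simp only [PySem.List.pyGetD_natCast, hc, decide_eq_true_eq, not_not]
    exact h i hi

-- characterisation of A
lemma A_iff (l : List Int) (m : Int) (hm : PySem.List.max? l (fun x => x) = some m) :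
    (is_valid_gray_code l = true ↔
      (∀ j < l.length, 0 ≤ l.getD j 0 ∧ l.getD j 0 ≤ ((1 <<< PySem.Int.bitLength m : Nat) : Int) - 1) ∧
      l.Nodup ∧
      ∀ j < l.length, pyHamming (l.getD j 0) (l.getD ((j + 1) % l.length) 0) = 1) := by
  have hne : l ≠ [] := by
    intro he; subst he
    rw [(PySem.List.max?_eq_none_iff ([] : List Int) (fun x => x)).2 rfl] at hm
    exact absurd hm (by simp)
  set mv : Int := ((1 <<< PySem.Int.bitLength m : Nat) : Int) - 1 with hmv
  simp only [is_valid_gray_code, hm]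
  rw [← cond34_iff l hne]
  have h00 : PySem.List.pyGetD l (0 : Int) 0 = l.getD 0 0 := by
    exact_mod_cast PySem.List.pyGetD_natCast l 0 0
  simp only [h00, pyGetD_neg_one l hne]
  split_ifs with h1 h2 h3 h4
  · simp only [false_iff]
    rintro ⟨hr, -, -⟩
    rw [(cond1_iff l mv).2 hr] at h1
    exact Bool.noConfusion h1
  · simp only [false_iff]
    rintro ⟨-, hn, -⟩
    exact h2 ((cond2_iff l).2 hn)
  · simp only [false_iff]
    rintro ⟨-, -, hc3, -⟩
    rw [(cond3_iff l).2 hc3] at h3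
    exact Bool.noConfusion h3
  · simp only [false_iff]
    rintro ⟨-, -, -, hc4⟩
    exact h4 hc4
  · simp only [true_iff]
    rw [Bool.not_eq_true] at h1 h3
    exact ⟨(cond1_iff l mv).1 h1, (cond2_iff l).1 (not_not.1 h2), (cond3_iff l).1 h3,
      not_not.1 h4⟩

-- any over a zip, pointwise
lemma zip_any_eq_false {α β : Type} (l1 : List α) (l2 : List β) (f : α × β → Bool) :
    ((l1.zip l2).any f = false) ↔
      ∀ i, ∀ h1 : i < l1.length, ∀ h2 : i < l2.length, f (l1[i], l2[i]) = false := by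
  rw [List.any_eq_false]
  constructor
  · intro h i h1 h2
    have hmem : (l1[i], l2[i]) ∈ l1.zip l2 := by
      have hz : i < (l1.zip l2).length := by simp [List.length_zip]; omega
      have : (l1.zip l2)[i] = (l1[i], l2[i]) := List.getElem_zip
      rw [← this]; exact List.getElem_mem hz
    simpa using h _ hmem
  · intro h x hx
    obtain ⟨i, hi, rfl⟩ := List.getElem_of_mem hx
    have h1 : i < l1.length := by simp [List.length_zip] at hi; omega
    have h2 : i < l2.length := by simp [List.length_zip] at hi; omega
    rw [List.getElem_zip]
    simpa using h i h1 h2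

-- Nat: a power of two iff the d & (d-1) trick fires
lemma pow2_of_and_pred (m : Nat) (hm : m ≠ 0) (h : m &&& (m - 1) = 0) : ∃ k, m = 2 ^ k := by
  induction m using Nat.strong_induction_on with
  | _ m ih =>
    rcases Nat.even_or_odd m with he | ho
    · obtain ⟨t, rfl⟩ := he
      have ht : t ≠ 0 := by omega
      have h2 : t &&& (t - 1) = 0 := by
        have hdt := Nat.and_div_two (a := t + t) (b := t + t - 1)
        have he2 : (t + t) / 2 = t := by omega
        have ho2 : (t + t - 1) / 2 = t - 1 := by omega
        rw [he2, ho2, h] at hdt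
        simp at hdt
        omega
      obtain ⟨k, hk⟩ := ih t (by omega) ht h2
      exact ⟨k + 1, by rw [pow_succ]; omega⟩
    · obtain ⟨t, rfl⟩ := ho
      rcases Nat.eq_zero_or_pos t with rfl | ht
      · exact ⟨0, by norm_num⟩
      · exfalso
        have hdt := Nat.and_div_two (a := 2 * t + 1) (b := 2 * t + 1 - 1)
        have he2 : (2 * t + 1) / 2 = t := by omega
        have ho2 : (2 * t + 1 - 1) / 2 = t := by omega
        rw [he2, ho2, Nat.and_self, h] at hdt
        simp at hdt
        omega

lemma and_pred_of_pow2 (k : Nat) : (2 ^ k) &&& (2 ^ k - 1) = 0 := by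
  rw [Nat.and_two_pow_sub_one_eq_mod]
  exact Nat.mod_self _

lemma bitCount_natCast_eq_zero (m : Nat) : PySem.Int.bitCount (m : Int) = 0 ↔ m = 0 := by
  induction m using Nat.strong_induction_on with
  | _ m ih =>
    rcases Nat.eq_zero_or_pos m with rfl | hm
    · simp [PySem.Int.bitCount_zero]
    · rw [PySem.Int.bitCount_natCast hm]
      rcases Nat.eq_zero_or_pos (m / 2) with h2 | h2
      · have hm1 : m = 1 := by omega
        subst hm1; simp
      · have := (ih (m / 2) (by omega)).not
        constructor
        · intro h
          have : PySem.Int.bitCount ((m / 2 : Nat) : Int) = 0 := by omega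
          rw [(ih (m / 2) (by omega))] at this
          omega
        · omega

lemma bitCount_pow2 (k : Nat) : PySem.Int.bitCount ((2 ^ k : Nat) : Int) = 1 := by
  induction k with
  | zero => decide
  | succ k ih =>
    rw [PySem.Int.bitCount_natCast (show 0 < 2 ^ (k + 1) by positivity)]
    have h1 : 2 ^ (k + 1) % 2 = 0 := by
      simp [pow_succ, Nat.mul_mod_left]
    have h2 : 2 ^ (k + 1) / 2 = 2 ^ k := by
      rw [pow_succ]; omega
    rw [h1, h2, ih]

lemma pow2_of_bitCount (m : Nat) (h : PySem.Int.bitCount (m : Int) = 1) : ∃ k, m = 2 ^ k := by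
  induction m using Nat.strong_induction_on with
  | _ m ih =>
    rcases Nat.eq_zero_or_pos m with rfl | hm
    · rw [Nat.cast_zero, PySem.Int.bitCount_zero] at h; omega
    · rw [PySem.Int.bitCount_natCast hm] at h
      rcases Nat.lt_or_ge m 2 with h2 | h2
      · exact ⟨0, by omega⟩
      · have hmod : m % 2 = 0 := by
          by_contra hc
          have : m % 2 = 1 := by omega
          rw [this] at h
          have : PySem.Int.bitCount ((m / 2 : Nat) : Int) = 0 := by omega
          rw [bitCount_natCast_eq_zero] at this
          omega
        rw [hmod] at h
        obtain ⟨k, hk⟩ := ih (m / 2) (by omega) (by omega)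
        exact ⟨k + 1, by rw [pow_succ]; omega⟩

-- the bit trick of B equals the popcount test of A, on nonnegative arguments
lemma pow2_pred_iff (x y : Int) (hx : 0 ≤ x) (hy : 0 ≤ y) :
    (pyHamming x y = 1) ↔
      (PySem.Int.bxor x y ≠ 0 ∧
        PySem.Int.band (PySem.Int.bxor x y) (PySem.Int.bxor x y - 1) = 0) := by
  rw [pyHamming, PySem.Int.bxor_of_nonneg hx hy]
  generalize (x.toNat ^^^ y.toNat : Nat) = m
  rcases Nat.eq_zero_or_pos m with rfl | hm
  · simp [PySem.Int.bitCount_zero]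
  · have hcast : ((m : Int) - 1) = ((m - 1 : Nat) : Int) := by omega
    rw [hcast, PySem.Int.band_natCast]
    constructor
    · intro h
      obtain ⟨k, rfl⟩ := pow2_of_bitCount m h
      refine ⟨by positivity, ?_⟩
      rw [and_pred_of_pow2]; rfl
    · rintro ⟨-, hband⟩
      have hband' : m &&& (m - 1) = 0 := by exact_mod_cast hband
      obtain ⟨k, rfl⟩ := pow2_of_and_pred m (by omega) hband'
      exact bitCount_pow2 k

-- the range condition of A collapses to min ≥ 0
lemma range_iff_min (l : List Int) (m mn : Int)
    (hm : PySem.List.max? l (fun x => x) = some m)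
    (hmn : PySem.List.min? l (fun x => x) = some mn) :
    ((∀ j < l.length, 0 ≤ l.getD j 0 ∧
        l.getD j 0 ≤ ((1 <<< PySem.Int.bitLength m : Nat) : Int) - 1) ↔ 0 ≤ mn) := by
  constructor
  · intro h
    obtain ⟨j, hj, hje⟩ := List.getElem_of_mem (PySem.List.min?_mem hmn)
    have := (h j hj).1
    rw [List.getD_eq_getElem _ _ hj, hje] at this
    exact this
  · intro h0 j hj
    have hmem : l.getD j 0 ∈ l := by rw [List.getD_eq_getElem _ _ hj]; exact l.getElem_mem hj
    have hlo : mn ≤ l.getD j 0 := PySem.List.min?_isMin hmn _ hmem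
    have hhi : l.getD j 0 ≤ m := PySem.List.max?_isMax hm _ hmem
    have hm0 : 0 ≤ m := le_trans (le_trans h0 hlo) hhi
    have habs : m.natAbs < 2 ^ PySem.Int.bitLength m := PySem.Int.lt_two_pow_bitLength m
    have hsh : (1 <<< PySem.Int.bitLength m : Nat) = 2 ^ PySem.Int.bitLength m :=
      Nat.one_shiftLeft _
    have : m < ((2 ^ PySem.Int.bitLength m : Nat) : Int) := by
      omega
    rw [hsh]
    omega

-- the sort-and-scan of B detects exactly the duplicates
lemma sorted_adjacent_iff (l : List Int) :
    (((PySem.List.sorted l (fun x => x) false).zip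
        (PySem.List.sorted l (fun x => x) false).tail).any
          (fun p => p.1 == p.2) = false) ↔ l.Nodup := by
  set s := PySem.List.sorted l (fun x => x) false with hs
  have hperm : s.Perm l := PySem.List.sorted_perm l (fun x => x) false
  rw [zip_any_eq_false]
  constructor
  · intro h
    refine hperm.nodup_iff.1 ?_
    have hle : s.Pairwise (fun a b => a ≤ b) := by
      simpa using PySem.List.sorted_pairwise (xs := l) (key := fun x => x)
    have hchain : List.IsChain (· < ·) s := by
      rw [List.isChain_iff_getElem]
      intro i hi
      have h1 : i < s.length := by omega
      have h2 : i < s.tail.length := by simp [List.length_tail]; omega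
      have hne : ¬ (s[i] = s.tail[i]'h2) := by simpa using h i h1 h2
      rw [List.getElem_tail] at hne
      have hle' := (List.isChain_iff_getElem.1 (List.isChain_iff_pairwise.2 hle)) i hi
      exact lt_of_le_of_ne hle' hne
    exact (List.isChain_iff_pairwise.1 hchain).imp ne_of_lt
  · intro hnd i h1 h2
    have hnds : s.Nodup := hperm.nodup_iff.2 hnd
    have h1' : i + 1 < s.length := by simp [List.length_tail] at h2; omega
    have := (List.pairwise_iff_getElem.1 hnds) i (i + 1) h1 h1' (by omega)
    simp only []
    rw [List.getElem_tail]
    simpa using this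

-- getElem of the rotated copy sequence[1:] + sequence[:1]
lemma rotated_getElem (l : List Int) (j : Nat) (hj : j < l.length)
    (hlen : j < (l.tail ++ l.take 1).length) :
    (l.tail ++ l.take 1)[j] = l.getD ((j + 1) % l.length) 0 := by
  have h0 : 0 < l.length := by omega
  have htl : l.tail.length = l.length - 1 := List.length_tail
  by_cases hj1 : j + 1 < l.length
  · rw [List.getElem_append_left (by omega)]
    rw [List.getElem_tail, Nat.mod_eq_of_lt hj1, List.getD_eq_getElem _ _ hj1]
  · have hje : j = l.length - 1 := by omega
    rw [List.getElem_append_right (by omega)]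
    subst hje
    rw [Nat.sub_add_cancel (by omega), Nat.mod_self]
    have : (l.take 1)[l.length - 1 - l.tail.length]'(by simp [List.length_take]; omega) = l[0] := by
      have he : l.length - 1 - l.tail.length = 0 := by omega
      simp [List.getElem_take]
    rw [this, List.getD_eq_getElem _ _ (by omega)]

-- characterisation of B
lemma B_iff (l : List Int) (mn : Int) (hmn : PySem.List.min? l (fun x => x) = some mn) :
    (is_valid_gray_code_alt l = true ↔
      0 ≤ mn ∧ l.Nodup ∧
      ∀ j < l.length,
        (PySem.Int.bxor (l.getD j 0) (l.getD ((j + 1) % l.length) 0) ≠ 0 ∧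
          PySem.Int.band (PySem.Int.bxor (l.getD j 0) (l.getD ((j + 1) % l.length) 0))
            (PySem.Int.bxor (l.getD j 0) (l.getD ((j + 1) % l.length) 0) - 1) = 0)) := by
  have hne : l ≠ [] := by
    intro he; subst he
    rw [(PySem.List.min?_eq_none_iff ([] : List Int) (fun x => x)).2 rfl] at hmn
    exact absurd hmn (by simp)
  have h0 : 0 < l.length := List.length_pos_iff.2 hne
  simp only [is_valid_gray_code_alt, hmn]
  rw [PySem.List.slice_from_one, PySem.List.slice_from_one]
  have hsl : PySem.List.slice l none (some 1) = l.take 1 := by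
    simpa using PySem.List.slice_to_natCast l 1
  rw [hsl]
  have htl : l.tail.length = l.length - 1 := List.length_tail
  have hrotlen : (l.tail ++ l.take 1).length = l.length := by
    simp [List.length_tail, List.length_take]; omega
  split_ifs with h1 h2 h3
  · simp only [false_iff]
    rintro ⟨hmin, -, -⟩
    simp only [decide_eq_true_eq] at h1
    omega
  · simp only [false_iff]
    rintro ⟨-, hn, -⟩
    rw [(sorted_adjacent_iff l).2 hn] at h2
    exact Bool.noConfusion h2
  · simp only [false_iff]
    rintro ⟨-, -, hadj⟩
    have hfalse : ((l.zip (l.tail ++ l.take 1)).any (fun p =>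
        let d := PySem.Int.bxor p.1 p.2
        decide (d = 0) || decide (PySem.Int.band d (d - 1) ≠ 0))) = false := by
      rw [zip_any_eq_false]
      intro i hi1 hi2
      simp only [Bool.or_eq_false_iff, decide_eq_false_iff_not, not_not]
      rw [rotated_getElem l i hi1 hi2, ← List.getD_eq_getElem l 0 hi1]
      exact hadj i hi1
    rw [hfalse] at h3
    exact Bool.noConfusion h3
  · simp only [true_iff]
    simp only [decide_eq_true_eq] at h1
    rw [Bool.not_eq_true] at h2
    rw [Bool.not_eq_true, zip_any_eq_false] at h3
    refine ⟨by omega, (sorted_adjacent_iff l).1 h2, ?_⟩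
    intro j hj
    have hj2 : j < (l.tail ++ l.take 1).length := by omega
    have := h3 j hj hj2
    simp only [Bool.or_eq_false_iff, decide_eq_false_iff_not, not_not] at this
    rw [rotated_getElem l j hj hj2, ← List.getD_eq_getElem l 0 hj] at this
    exact this

-- ===== VERDICT (by name: the statement is the Claim_ definition above) =====
theorem is_valid_gray_code_spec : Claim_equal_is_valid_gray_code := by
  unfold Claim_equal_is_valid_gray_code
  intro sequence _hdom hpre
  unfold Spec_is_valid_gray_code
  obtain ⟨m, hm⟩ : ∃ m, PySem.List.max? sequence (fun x => x) = some m := by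
    cases hc : PySem.List.max? sequence (fun x => x) with
    | none => exact absurd ((PySem.List.max?_eq_none_iff _ _).1 hc) hpre
    | some m => exact ⟨m, rfl⟩
  obtain ⟨mn, hmn⟩ : ∃ mn, PySem.List.min? sequence (fun x => x) = some mn := by
    cases hc : PySem.List.min? sequence (fun x => x) with
    | none => exact absurd ((PySem.List.min?_eq_none_iff _ _).1 hc) hpre
    | some mn => exact ⟨mn, rfl⟩
  rw [Bool.eq_iff_iff, A_iff sequence m hm, B_iff sequence mn hmn]
  constructor
  · rintro ⟨hr, hn, hh⟩
    refine ⟨(range_iff_min sequence m mn hm hmn).1 hr, hn, fun j hj => ?_⟩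
    have hx := (hr j hj).1
    have hy := (hr ((j + 1) % sequence.length) (Nat.mod_lt _ (by omega))).1
    exact (pow2_pred_iff _ _ hx hy).1 (hh j hj)
  · rintro ⟨hmin, hn, hp⟩
    have hr := (range_iff_min sequence m mn hm hmn).2 hmin
    refine ⟨hr, hn, fun j hj => ?_⟩
    have hx := (hr j hj).1
    have hy := (hr ((j + 1) % sequence.length) (Nat.mod_lt _ (by omega))).1
    exact (pow2_pred_iff _ _ hx hy).2 (hp j hj)
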